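-- pv_equiv track=rewrite | github.com/mean71/codingtest | 프로그래머스/2/87946. 피로도/피로도.py | solution
-- ===== SOURCE A (Python) =====
-- from itertools import permutations
--
-- def solution(k, dungeons):
--     res = 0
--
--     for perm in permutations(d for d in dungeons if d[0] <= k):
--         cur_k = k
--         cnt = 0
--
--         for min_k, consum_k in perm:
--             if cur_k >= min_k:
--                 cur_k -= consum_k
--                 cnt += 1
--             else:
--                 break
--
--         res = max(res, cnt)
--
--     return res
-- ===== SOURCE B (Python) =====
-- def solution(k, dungeons):
--     ds = [d for d in dungeons if d[0] <= k]
--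
--     def best(cur, rem):
--         b = 0
--         for i in range(len(rem)):
--             min_k, consum_k = rem[i]
--             if min_k <= cur:
--                 b = max(b, 1 + best(cur - consum_k, rem[:i] + rem[i + 1:]))
--         return b
--
--     return best(k, ds)
-- ===== Notes on version B (the rewrite author's own statement) =====
-- stated objective: alternative
-- what changed: replaces enumeration of all permutations with per-permutation simulation-and-break by a recursive backtracking search that extends only still-clearable orders and shares common prefixes
import Mathlib
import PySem

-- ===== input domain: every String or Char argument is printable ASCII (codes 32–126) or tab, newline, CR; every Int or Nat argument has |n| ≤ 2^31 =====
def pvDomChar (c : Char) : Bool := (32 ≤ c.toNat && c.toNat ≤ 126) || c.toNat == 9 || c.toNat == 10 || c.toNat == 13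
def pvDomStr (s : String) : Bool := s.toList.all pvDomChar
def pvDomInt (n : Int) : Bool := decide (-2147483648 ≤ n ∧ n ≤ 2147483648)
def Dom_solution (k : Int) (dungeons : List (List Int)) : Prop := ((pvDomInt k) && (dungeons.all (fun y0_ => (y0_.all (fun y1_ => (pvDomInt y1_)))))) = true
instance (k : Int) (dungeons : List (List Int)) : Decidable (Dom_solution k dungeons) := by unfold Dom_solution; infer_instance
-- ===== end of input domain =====

-- B is a different algorithm (recursive backtracking with pruning instead of enumerating
-- all permutations and simulating each with break); return values proved equal on Pre_.

-- ===== PORT A =====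
-- inner loop of A: walk the permutation, clear while cur_k >= min_k, break otherwise
def simPerm : Int → Int → List (List Int) → Int
  | _, cnt, [] => cnt
  | cur_k, cnt, d :: rest =>
      if d.getD 0 0 ≤ cur_k then simPerm (cur_k - d.getD 1 0) (cnt + 1) rest else cnt

-- itertools.permutations, ported as "pick each index first, recurse on the rest";
-- fuel = length of the list makes the recursion structural (never exhausted in use)
def pyPermsF : Nat → List (List Int) → List (List (List Int))
  | _, [] => [[]]
  | 0, _ :: _ => [[]]
  | fuel + 1, d :: tl =>
      (List.range (d :: tl).length).flatMap (fun i =>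
        (pyPermsF fuel ((d :: tl).eraseIdx i)).map (fun p => (d :: tl).getD i [] :: p))

def solution (k : Int) (dungeons : List (List Int)) : Int :=
  let filtered := dungeons.filter (fun d => d.getD 0 0 ≤ k)
  (pyPermsF filtered.length filtered).foldl (fun res p => max res (simPerm k 0 p)) 0

-- ===== PORT B =====
-- best(cur, rem): try every still-clearable dungeon first, recurse on the rest
def bestBF : Nat → Int → List (List Int) → Int
  | 0, _, _ => 0
  | fuel + 1, cur, rem =>
      (List.range rem.length).foldl (fun b i =>
        if (rem.getD i []).getD 0 0 ≤ cur then
          max b (1 + bestBF fuel (cur - (rem.getD i []).getD 1 0) (rem.eraseIdx i))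
        else b) 0

def solution_alt (k : Int) (dungeons : List (List Int)) : Int :=
  let ds := dungeons.filter (fun d => d.getD 0 0 ≤ k)
  bestBF ds.length k ds

-- ===== PRECONDITION & SPEC =====
-- Pre_ excludes exactly the inputs where A raises: an empty dungeon (IndexError on d[0])
-- or a dungeon with d[0] <= k that is not a [min, cost] pair (ValueError on unpacking).
def Pre_solution (k : Int) (dungeons : List (List Int)) : Prop :=
  ∀ d ∈ dungeons, d ≠ [] ∧ (d.getD 0 0 ≤ k → d.length = 2)
instance (k : Int) (dungeons : List (List Int)) : Decidable (Pre_solution k dungeons) := by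
  unfold Pre_solution; infer_instance

def pvWitness_solution : Int × List (List Int) := (80, [[80, 20], [50, 40], [30, 10]])

def Spec_solution (k : Int) (dungeons : List (List Int)) (out : Int) : Prop := out = solution_alt k dungeons
instance (k : Int) (dungeons : List (List Int)) (out : Int) : Decidable (Spec_solution k dungeons out) := by unfold Spec_solution; infer_instance

-- ===== CLAIM (what is proved, stated in full; the proofs are below) =====
def Claim_equal_solution : Prop := ∀ (k : Int) (dungeons : List (List Int)), Dom_solution k dungeons → Pre_solution k dungeons → Spec_solution k dungeons (solution k dungeons)

-- ===== LEMMAS AND PROOFS =====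

lemma simPerm_shift (p : List (List Int)) : ∀ (cur cnt : Int),
    simPerm cur cnt p = cnt + simPerm cur 0 p := by
  induction p with
  | nil => intro cur cnt; simp [simPerm]
  | cons d rest ih =>
      intro cur cnt
      simp only [simPerm]
      split
      · rw [ih _ (cnt + 1), ih _ (0 + 1)]; ring
      · simp

lemma simPerm_nonneg (p : List (List Int)) : ∀ (cur : Int), 0 ≤ simPerm cur 0 p := by
  induction p with
  | nil => intro cur; simp [simPerm]
  | cons d rest ih =>
      intro cur
      simp only [simPerm]
      split
      · rw [simPerm_shift]; have := ih (cur - d.getD 1 0); omega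
      · exact le_refl 0

lemma pyPermsF_ne_nil : ∀ (fuel : Nat) (l : List (List Int)), pyPermsF fuel l ≠ [] := by
  intro fuel
  induction fuel with
  | zero => intro l; cases l <;> simp [pyPermsF]
  | succ n ih =>
      intro l
      cases l with
      | nil => simp [pyPermsF]
      | cons d tl =>
          simp only [pyPermsF, ne_eq, List.flatMap_eq_nil_iff, not_forall]
          refine ⟨0, ?_, ?_⟩
          · simp
          · simp [ih]

lemma foldl_const_max (off : Int) {γ : Type} :
    ∀ (l : List γ) (r : Int), l ≠ [] →
      l.foldl (fun r _ => max r off) r = max r off := by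
  intro l
  induction l with
  | nil => intro r h; exact absurd rfl h
  | cons q l' ih =>
      intro r _
      simp only [List.foldl_cons]
      cases l' with
      | nil => simp
      | cons q' l'' =>
          rw [ih _ (by simp), max_assoc, max_self]

lemma le_foldl_of_step {f : Int → Nat → Int} (hf : ∀ b i, b ≤ f b i) :
    ∀ (is : List Nat) (b : Int), b ≤ is.foldl f b := by
  intro is
  induction is with
  | nil => intro b; exact le_refl b
  | cons i is' ih => intro b; exact le_trans (hf b i) (ih (f b i))

lemma bestBF_nonneg (fuel : Nat) (cur : Int) (rem : List (List Int)) :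
    0 ≤ bestBF fuel cur rem := by
  cases fuel with
  | zero => exact le_refl 0
  | succ n =>
      simp only [bestBF]
      apply le_foldl_of_step
      intro b i
      split
      · exact le_max_left _ _
      · exact le_refl b

lemma foldl_start (s : List (List Int) → Int) (hs : ∀ q, 0 ≤ s q) (off a : Int)
    (l : List (List (List Int))) (hl : l ≠ []) :
    l.foldl (fun r q => max r (off + s q)) a
      = l.foldl (fun r q => max r (off + s q)) (max a off) := by
  cases l with
  | nil => exact absurd rfl hl
  | cons q l' =>
      simp only [List.foldl_cons]
      have h : max (max a off) (off + s q) = max a (off + s q) := by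
        rw [max_assoc, max_eq_right (le_add_of_nonneg_right (hs q))]
      rw [h]

lemma aux_lemma (fuel : Nat) (d : List Int) (tl : List (List Int)) (cur off a : Int)
    (hoff : 0 ≤ off) (hlen : (d :: tl).length ≤ fuel + 1)
    (ihmain : ∀ (ds : List (List Int)), ds.length ≤ fuel → ∀ (cur off a : Int), 0 ≤ off →
      (pyPermsF fuel ds).foldl (fun r q => max r (off + simPerm cur 0 q)) a
        = max a (off + bestBF fuel cur ds)) :
    ∀ (is : List Nat), (∀ i ∈ is, i < (d :: tl).length) → ∀ (b : Int), 0 ≤ b →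
      (is.flatMap (fun i =>
          (pyPermsF fuel ((d :: tl).eraseIdx i)).map (fun p => (d :: tl).getD i [] :: p))).foldl
        (fun r q => max r (off + simPerm cur 0 q)) (max a (off + b))
      = max a (off + is.foldl (fun b i =>
          if ((d :: tl).getD i []).getD 0 0 ≤ cur then
            max b (1 + bestBF fuel (cur - ((d :: tl).getD i []).getD 1 0) ((d :: tl).eraseIdx i))
          else b) b) := by
  intro is
  induction is with
  | nil => intro _ b _; simp
  | cons i is' ih =>
      intro hmem b hb
      have hi : i < (d :: tl).length := hmem i (List.mem_cons_self ..)
      have herase : ((d :: tl).eraseIdx i).length ≤ fuel := by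
        rw [List.length_eraseIdx]
        simp only [hi, if_pos]
        omega
      simp only [List.flatMap_cons, List.foldl_append, List.foldl_cons, List.foldl_map]
      by_cases hc : ((d :: tl).getD i []).getD 0 0 ≤ cur
      · have hsim : ∀ p, simPerm cur 0 ((d :: tl).getD i [] :: p)
            = 1 + simPerm (cur - ((d :: tl).getD i []).getD 1 0) 0 p := by
          intro p
          simp only [simPerm, if_pos hc, zero_add]
          rw [simPerm_shift]
        simp only [hsim, ← add_assoc]
        rw [ihmain _ herase _ (off + 1) _ (by omega)]
        rw [if_pos hc]
        have hres : max (max a (off + b))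
              (off + 1 + bestBF fuel (cur - ((d :: tl).getD i []).getD 1 0) ((d :: tl).eraseIdx i))
            = max a (off + max b
              (1 + bestBF fuel (cur - ((d :: tl).getD i []).getD 1 0) ((d :: tl).eraseIdx i))) := by
          rw [max_assoc]
          congr 1
          rw [← max_add_add_left]
          congr 1
          ring
        rw [hres]
        exact ih (fun j hj => hmem j (List.mem_cons_of_mem _ hj)) _ (le_trans hb (le_max_left _ _))
      · have hsim : ∀ p, simPerm cur 0 ((d :: tl).getD i [] :: p) = 0 := by
          intro p; simp only [simPerm, if_neg hc]
        simp only [hsim, add_zero]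
        rw [foldl_const_max _ _ _ (pyPermsF_ne_nil _ _)]
        rw [max_assoc, max_eq_left (le_add_of_nonneg_right hb)]
        rw [if_neg hc]
        exact ih (fun j hj => hmem j (List.mem_cons_of_mem _ hj)) b hb

lemma main_lemma : ∀ (fuel : Nat) (ds : List (List Int)), ds.length ≤ fuel →
    ∀ (cur off a : Int), 0 ≤ off →
      (pyPermsF fuel ds).foldl (fun r q => max r (off + simPerm cur 0 q)) a
        = max a (off + bestBF fuel cur ds) := by
  intro fuel
  induction fuel with
  | zero =>
      intro ds hlen cur off a hoff
      have hds : ds = [] := List.length_eq_zero_iff.mp (Nat.le_zero.mp hlen)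
      subst hds
      simp [pyPermsF, bestBF, simPerm]
  | succ fuel ih =>
      intro ds hlen cur off a hoff
      cases ds with
      | nil => simp [pyPermsF, bestBF, simPerm]
      | cons d tl =>
          simp only [pyPermsF, bestBF]
          have hne : ((List.range (d :: tl).length).flatMap (fun i =>
              (pyPermsF fuel ((d :: tl).eraseIdx i)).map (fun p => (d :: tl).getD i [] :: p))) ≠ [] := by
            simp only [ne_eq, List.flatMap_eq_nil_iff, not_forall]
            refine ⟨0, ?_, ?_⟩
            · simp
            · simp [pyPermsF_ne_nil]
          rw [foldl_start (simPerm cur 0) (fun q => simPerm_nonneg q cur) off a _ hne]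
          have hzero : max a off = max a (off + 0) := by omega
          rw [hzero]
          exact aux_lemma fuel d tl cur off a hoff hlen ih (List.range (d :: tl).length)
            (fun i hi => List.mem_range.mp hi) 0 (le_refl 0)

-- ===== VERDICT (by name: the statement is the Claim_ definition above) =====
theorem solution_spec : Claim_equal_solution := by
  intro k dungeons _ _
  show solution k dungeons = solution_alt k dungeons
  unfold solution solution_alt
  have h := main_lemma (dungeons.filter (fun d => d.getD 0 0 ≤ k)).length
    (dungeons.filter (fun d => d.getD 0 0 ≤ k)) (le_refl _) k 0 0 (le_refl 0)
  simp only [zero_add] at h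
  rw [h, max_eq_right (bestBF_nonneg _ _ _)]
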